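-- pv_equiv track=rewrite | github.com/craigmbooth/aissist | aissistant/assistant.py | bold_single_backticks
-- ===== SOURCE A (Python) =====
-- def bold_single_backticks(text):
--     """Formats a given string by making text enclosed in single backticks bold,
--     using ANSI escape codes.
--     """
--     in_backticks = False
--     result = ''
--     for indx, c in enumerate(text):
--         if c == '`':
--
--             if in_backticks:
--                 result += '\033[0m'  # Reset text formatting
--                 in_backticks = False
--             else:
--                 result += '\033[1m'  # Bold text
--                 in_backticks = True
--         else:
--             result += c
--
--     if in_backticks:
--         result += '\033[0m'  # Reset text formatting
--
--     return result
-- ===== SOURCE B (Python) =====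
-- def bold_single_backticks(text):
--     parts = text.split('`')
--     result = parts[0]
--     for i, seg in enumerate(parts[1:], 1):
--         result += ('\033[1m' if i % 2 == 1 else '\033[0m') + seg
--     if len(parts) % 2 == 0:
--         result += '\033[0m'
--     return result
-- ===== Notes on version B (the rewrite author's own statement) =====
-- stated objective: faster
-- what changed: Replaces the per-character loop with a toggling flag (and per-character string concatenation) by one split on the backtick character followed by reconstruction from whole segments, choosing each ANSI code from the 1-based segment index's parity and the trailing reset from the segment-count parity.
import Mathlib
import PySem

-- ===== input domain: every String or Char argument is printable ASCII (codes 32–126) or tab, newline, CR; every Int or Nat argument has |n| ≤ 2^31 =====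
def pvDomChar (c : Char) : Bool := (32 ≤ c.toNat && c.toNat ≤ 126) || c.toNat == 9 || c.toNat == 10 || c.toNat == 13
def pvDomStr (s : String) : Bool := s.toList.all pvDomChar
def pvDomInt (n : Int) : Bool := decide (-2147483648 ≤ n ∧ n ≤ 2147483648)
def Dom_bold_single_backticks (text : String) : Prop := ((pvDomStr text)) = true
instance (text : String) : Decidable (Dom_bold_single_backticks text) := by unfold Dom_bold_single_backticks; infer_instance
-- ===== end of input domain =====

-- B rebuilds the string from text.split('`') segments by index parity instead of A's per-character flag toggle; objective: faster (bulk segment concatenation instead of per-character +=, measured); same return value everywhere.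

def pvBoldCode : List Char := ['\x1b', '[', '1', 'm']
def pvResetCode : List Char := ['\x1b', '[', '0', 'm']

-- ===== PORT A =====
def bold_single_backticks (text : String) : String :=
  let fin := text.toList.foldl
    (fun (s : Bool × List Char) c =>
      if c = '`' then
        if s.1 then (false, s.2 ++ pvResetCode) else (true, s.2 ++ pvBoldCode)
      else (s.1, s.2 ++ [c]))
    (false, [])
  String.ofList (if fin.1 then fin.2 ++ pvResetCode else fin.2)

-- ===== PORT B =====
def bold_single_backticks_alt (text : String) : String :=
  let parts := text.toList.splitOn '`'
  let r := (PySem.List.enumerate parts.tail 1).foldl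
    (fun acc p => acc ++ (if p.1 % 2 == 1 then pvBoldCode else pvResetCode) ++ p.2)
    parts.headI
  String.ofList (if parts.length % 2 == 0 then r ++ pvResetCode else r)

-- ===== PRECONDITION & SPEC =====
def Spec_bold_single_backticks (text : String) (out : String) : Prop := out = bold_single_backticks_alt text
instance (text : String) (out : String) : Decidable (Spec_bold_single_backticks text out) := by unfold Spec_bold_single_backticks; infer_instance

-- ===== CLAIM (what is proved, stated in full; the proofs are below) =====
def Claim_equal_bold_single_backticks : Prop := ∀ (text : String), Dom_bold_single_backticks text → Spec_bold_single_backticks text (bold_single_backticks text)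

-- ===== LEMMAS AND PROOFS =====

-- A's per-character toggle as a structural recursion
def pvRenderA : List Char → Bool → List Char
  | [], b => if b then pvResetCode else []
  | c :: t, b =>
      if c = '`' then (if b then pvResetCode else pvBoldCode) ++ pvRenderA t (!b)
      else c :: pvRenderA t b

-- segment reconstruction with trailing reset, by flag
def pvGSeg : List (List Char) → Bool → List Char
  | [], b => if b then pvResetCode else []
  | p :: ps, b => (if b then pvResetCode else pvBoldCode) ++ p ++ pvGSeg ps (!b)

-- segment reconstruction without trailing reset
def pvBody : List (List Char) → Bool → List Char
  | [], _ => []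
  | p :: ps, b => (if b then pvResetCode else pvBoldCode) ++ p ++ pvBody ps (!b)

theorem pvFoldA (l : List Char) (b : Bool) (acc : List Char) :
    (if (l.foldl
      (fun (s : Bool × List Char) c =>
        if c = '`' then
          if s.1 then (false, s.2 ++ pvResetCode) else (true, s.2 ++ pvBoldCode)
        else (s.1, s.2 ++ [c]))
      (b, acc)).1
     then (l.foldl
      (fun (s : Bool × List Char) c =>
        if c = '`' then
          if s.1 then (false, s.2 ++ pvResetCode) else (true, s.2 ++ pvBoldCode)
        else (s.1, s.2 ++ [c]))
      (b, acc)).2 ++ pvResetCode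
     else (l.foldl
      (fun (s : Bool × List Char) c =>
        if c = '`' then
          if s.1 then (false, s.2 ++ pvResetCode) else (true, s.2 ++ pvBoldCode)
        else (s.1, s.2 ++ [c]))
      (b, acc)).2) = acc ++ pvRenderA l b := by
  induction l generalizing b acc with
  | nil => cases b <;> simp [pvRenderA]
  | cons c t ih =>
      by_cases hc : c = '`'
      · cases b <;> simp [hc, pvRenderA, ih]
      · simp [hc, pvRenderA, ih]

theorem pvRender_split (l : List Char) (b : Bool) :
    pvRenderA l b = (l.splitOn '`').headI ++ pvGSeg (l.splitOn '`').tail b := by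
  induction l generalizing b with
  | nil => simp [pvRenderA, pvGSeg, List.splitOn]
  | cons c t ih =>
      rcases h : List.splitOnP (fun x => x == '`') t with _ | ⟨p, ps⟩
      · exact absurd h (List.splitOnP_ne_nil _ t)
      · by_cases hc : c = '`'
        · simp [pvRenderA, hc, List.splitOn, List.splitOnP_cons, h, pvGSeg]
          simpa [List.splitOn, h] using ih (!b)
        · simp [pvRenderA, hc, List.splitOn, List.splitOnP_cons, h, pvGSeg]
          simpa [List.splitOn, h] using ih b

theorem pvGSeg_eq (ps : List (List Char)) (b : Bool) :
    pvGSeg ps b = pvBody ps b ++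
      (if (ps.length % 2 == 1) != b then pvResetCode else []) := by
  induction ps generalizing b with
  | nil => cases b <;> simp [pvGSeg, pvBody]
  | cons p ps ih =>
      rcases (by omega : ps.length % 2 = 0 ∨ ps.length % 2 = 1) with h | h
      · have h2 : (ps.length + 1) % 2 = 1 := by omega
        cases b <;> simp [pvGSeg, pvBody, ih, h, h2]
      · have h2 : (ps.length + 1) % 2 = 0 := by omega
        cases b <;> simp [pvGSeg, pvBody, ih, h, h2]

theorem pvEnumFold (ps : List (List Char)) (n : Int) (acc : List Char) (hn : 0 ≤ n) :
    (PySem.List.enumerate ps n).foldl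
      (fun acc p => acc ++ (if p.1 % 2 == 1 then pvBoldCode else pvResetCode) ++ p.2) acc
    = acc ++ pvBody ps (n % 2 == 0) := by
  induction ps generalizing n acc with
  | nil => simp [PySem.List.enumerate, pvBody]
  | cons p ps ih =>
      simp only [PySem.List.enumerate, List.foldl_cons]
      rw [ih (n + 1) _ (by omega)]
      rcases (by omega : n % 2 = 0 ∨ n % 2 = 1) with h | h
      · have h2 : (n + 1) % 2 = 1 := by omega
        simp [pvBody, h, h2]
      · have h2 : (n + 1) % 2 = 0 := by omega
        simp [pvBody, h, h2]

theorem pvSplit_ne_nil (l : List Char) : l.splitOn '`' ≠ [] := by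
  simp [List.splitOn]
  exact List.splitOnP_ne_nil _ l

-- ===== VERDICT (by name: the statement is the Claim_ definition above) =====
theorem bold_single_backticks_spec : Claim_equal_bold_single_backticks := by
  intro text _
  unfold Spec_bold_single_backticks
  simp only [bold_single_backticks, bold_single_backticks_alt]
  rw [pvFoldA, pvRender_split, pvEnumFold _ _ _ (by norm_num), pvGSeg_eq]
  rcases h : text.toList.splitOn '`' with _ | ⟨p, ps⟩
  · exact absurd h (pvSplit_ne_nil _)
  · have h1 : ((1 : Int) % 2 == 0) = false := by decide
    simp only [List.headI, List.tail, List.length_cons, h1, List.nil_append]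
    rcases (by omega : ps.length % 2 = 0 ∨ ps.length % 2 = 1) with hp | hp
    · have h2 : (ps.length + 1) % 2 = 1 := by omega
      simp [hp, h2]
    · have h2 : (ps.length + 1) % 2 = 0 := by omega
      simp [hp, h2]
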